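-- pv_equiv track=rewrite | github.com/AugmentOS-Community/AugmentOS | server/DatabaseHandler.py | find_closest_start_word_index
-- ===== SOURCE A (Python) =====
-- def find_closest_start_word_index(text, curr_index):
--     latest_stop_index = 0
--     for i, c in enumerate(text):
--         if c == " ":
--             if(i > curr_index):
--                 return latest_stop_index
--             latest_stop_index = i
--     return curr_index
-- ===== SOURCE B (Python) =====
-- def find_closest_start_word_index(text, curr_index):
--     start = max(curr_index + 1, 0)
--     after = text.find(" ", start)
--     if after == -1:
--         return curr_index
--     before = text.rfind(" ", 0, start)
--     return before if before != -1 else 0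
-- ===== Notes on version B (the rewrite author's own statement) =====
-- stated objective: idiomatic
-- what changed: Replaced the single stateful forward scan with an early return by two anchored library searches: text.find(' ', curr_index+1 clamped to 0) to detect a space after curr_index, and text.rfind(' ', 0, curr_index+1) for the last space at or before it.
import Mathlib
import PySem

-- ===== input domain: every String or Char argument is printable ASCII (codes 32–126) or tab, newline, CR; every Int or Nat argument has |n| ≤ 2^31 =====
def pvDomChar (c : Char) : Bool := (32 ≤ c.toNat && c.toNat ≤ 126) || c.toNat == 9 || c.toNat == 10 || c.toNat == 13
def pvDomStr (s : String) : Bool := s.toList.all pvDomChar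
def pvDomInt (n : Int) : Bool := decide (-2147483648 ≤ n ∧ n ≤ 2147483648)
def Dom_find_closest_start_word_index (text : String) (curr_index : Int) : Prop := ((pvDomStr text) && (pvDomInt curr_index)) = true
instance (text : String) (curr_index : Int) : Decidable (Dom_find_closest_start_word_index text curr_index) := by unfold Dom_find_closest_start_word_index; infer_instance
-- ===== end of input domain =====

-- B replaces A's single stateful forward scan (with an early return) by two anchored
-- library searches, str.find and str.rfind (objective: idiomatic; same return value everywhere).

-- ===== PORT A =====
-- the for-loop over enumerate(text): early `return latest_stop_index` modelled as `some _`,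
-- falling off the loop as `none` (then the final `return curr_index` is `getD curr_index`)
def fcswiLoop (curr : Int) : List Char → Nat → Int → Option Int
  | [], _, _ => none
  | c :: rest, i, latest =>
    if c = ' ' then
      if (i : Int) > curr then some latest
      else fcswiLoop curr rest (i + 1) (i : Int)
    else fcswiLoop curr rest (i + 1) latest

def find_closest_start_word_index (text : String) (curr_index : Int) : Int :=
  (fcswiLoop curr_index text.toList 0 0).getD curr_index

-- ===== PORT B =====
def find_closest_start_word_index_alt (text : String) (curr_index : Int) : Int :=
  let start := max (curr_index + 1) 0
  let after := PySem.Str.findFrom text " " start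
  if after = -1 then curr_index
  else
    let before := PySem.Str.rfindFrom text " " 0 (some start)
    if before ≠ -1 then before else 0

-- ===== PRECONDITION & SPEC =====
def Spec_find_closest_start_word_index (text : String) (curr_index : Int) (out : Int) : Prop := out = find_closest_start_word_index_alt text curr_index
instance (text : String) (curr_index : Int) (out : Int) : Decidable (Spec_find_closest_start_word_index text curr_index out) := by unfold Spec_find_closest_start_word_index; infer_instance

-- ===== CLAIM (what is proved, stated in full; the proofs are below) =====
def Claim_equal_find_closest_start_word_index : Prop := ∀ (text : String) (curr_index : Int), Dom_find_closest_start_word_index text curr_index → Spec_find_closest_start_word_index text curr_index (find_closest_start_word_index text curr_index)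

-- ===== LEMMAS AND PROOFS =====

lemma pvSingleton_infix {a : Char} {l : List Char} : [a] <:+: l ↔ a ∈ l := by
  constructor
  · intro h; exact h.subset (by simp)
  · intro h; obtain ⟨s, t, rfl⟩ := List.append_of_mem h; exact ⟨s, t, by simp⟩

lemma pvPrefix_head {l : List Char} : [' '].isPrefixOf l = true ↔ l.head? = some ' ' := by
  cases l <;> simp [List.isPrefixOf]
  · exact eq_comm

lemma pvGo_spec (cs : List Char) (k : Nat) :
    PySem.Chars.rfind.go cs [' '] k =
      if ∃ j ≤ k, cs[j]? = some ' ' then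
        ((Nat.findGreatest (fun j => cs[j]? = some ' ') k : Nat) : Int)
      else -1 := by
  induction k with
  | zero =>
      simp only [PySem.Chars.rfind.go]
      have h0 : [' '].isPrefixOf cs = true ↔ cs[0]? = some ' ' := by
        rw [pvPrefix_head]; simp [List.head?_eq_getElem?]
      by_cases h : cs[0]? = some ' ' <;> simp [h, h0, Nat.findGreatest]
  | succ j ih =>
      simp only [PySem.Chars.rfind.go]
      have h0 : [' '].isPrefixOf (cs.drop (j+1)) = true ↔ cs[j+1]? = some ' ' := by
        rw [pvPrefix_head]; rw [List.head?_drop]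
      by_cases h : cs[j+1]? = some ' '
      · have hg : Nat.findGreatest (fun j => cs[j]? = some ' ') (j+1) = j+1 := by
          simp [h]
        rw [if_pos (h0.mpr h), if_pos ⟨j+1, le_refl _, h⟩, hg]
      · have hiff : (∃ i ≤ j + 1, cs[i]? = some ' ') ↔ (∃ i ≤ j, cs[i]? = some ' ') := by
          constructor
          · rintro ⟨i, hi, hsp⟩
            rcases Nat.lt_or_ge i (j+1) with h1 | h1
            · exact ⟨i, Nat.lt_succ_iff.mp h1, hsp⟩
            · exact absurd hsp (by have : i = j + 1 := le_antisymm hi h1; rw [this]; exact h)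
          · rintro ⟨i, hi, hsp⟩; exact ⟨i, le_trans hi (Nat.le_succ _), hsp⟩
        have hg : Nat.findGreatest (fun j => cs[j]? = some ' ') (j+1)
            = Nat.findGreatest (fun j => cs[j]? = some ' ') j := by
          simp [h]
        have hnp : ¬ ([' '].isPrefixOf (List.drop (j+1) cs) = true) := fun hc => h (h0.mp hc)
        rw [if_neg hnp, ih, if_congr hiff rfl rfl, hg]

def pvLastSp (curr : Int) : List Char → Nat → Option Nat
  | [], _ => none
  | c :: rest, i =>
    match pvLastSp curr rest (i + 1) with
    | some j => some j
    | none => if c = ' ' ∧ (i : Int) ≤ curr then some i else none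

lemma pvLastSp_none (curr : Int) : ∀ (cs : List Char) (i : Nat), curr < (i : Int) →
    pvLastSp curr cs i = none := by
  intro cs
  induction cs with
  | nil => intro i _; rfl
  | cons c rest ih =>
      intro i hi
      simp only [pvLastSp, ih (i+1) (by push_cast; omega)]
      rw [if_neg (by omega)]

lemma pvLastSp_none_iff (curr : Int) : ∀ (cs : List Char) (i : Nat),
    (pvLastSp curr cs i = none ↔ ∀ k : Nat, cs[k]? = some ' ' → curr < (i : Int) + k) := by
  intro cs
  induction cs with
  | nil => intro i; simp [pvLastSp]
  | cons c rest ih =>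
      intro i
      simp only [pvLastSp]
      constructor
      · intro h k hk
        rcases hrec : pvLastSp curr rest (i+1) with _ | j
        · rw [hrec] at h
          simp only [] at h
          rcases k with _ | k
          · have hc : c = ' ' := by simpa using hk
            by_cases hle : (i : Int) ≤ curr
            · rw [if_pos ⟨hc, hle⟩] at h; exact absurd h (by simp)
            · push_cast; omega
          · have := (ih (i+1)).mp hrec k (by simpa using hk)
            push_cast at this ⊢; omega
        · rw [hrec] at h; simp at h
      · intro h
        have h1 : pvLastSp curr rest (i+1) = none := by
          rw [ih (i+1)]
          intro k hk
          have := h (k+1) (by simpa using hk)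
          push_cast at this ⊢; omega
        rw [h1]
        simp only []
        rw [if_neg]
        intro ⟨hc, hle⟩
        have := h 0 (by simp [hc])
        push_cast at this; omega

lemma pvLastSp_mem (curr : Int) : ∀ (cs : List Char) (i : Nat) (a : Nat),
    pvLastSp curr cs i = some a → i ≤ a ∧ cs[a - i]? = some ' ' ∧ (a : Int) ≤ curr := by
  intro cs
  induction cs with
  | nil => intro i a h; exact absurd h (by simp [pvLastSp])
  | cons c rest ih =>
      intro i a h
      simp only [pvLastSp] at h
      rcases hrec : pvLastSp curr rest (i+1) with _ | j
      · rw [hrec] at h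
        simp only [] at h
        by_cases hcon : c = ' ' ∧ (i : Int) ≤ curr
        · rw [if_pos hcon] at h
          have ha : a = i := by injection h with h'; omega
          refine ⟨by omega, ?_, by rw [ha]; exact hcon.2⟩
          rw [ha]; simp [hcon.1]
        · rw [if_neg hcon] at h; exact absurd h (by simp)
      · rw [hrec] at h
        simp only [] at h
        have h' : j = a := by injection h
        obtain ⟨h1, h2, h3⟩ := ih (i+1) j hrec
        rw [← h']
        refine ⟨by omega, ?_, h3⟩
        have : j - i = (j - (i+1)) + 1 := by omega
        rw [this]; simpa using h2

lemma pvLastSp_max (curr : Int) : ∀ (cs : List Char) (i : Nat) (a : Nat),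
    pvLastSp curr cs i = some a →
    ∀ k : Nat, cs[k]? = some ' ' → (i : Int) + k ≤ curr → i + k ≤ a := by
  intro cs
  induction cs with
  | nil => intro i a h; exact absurd h (by simp [pvLastSp])
  | cons c rest ih =>
      intro i a h k hk hle
      simp only [pvLastSp] at h
      rcases hrec : pvLastSp curr rest (i+1) with _ | j
      · rw [hrec] at h
        simp only [] at h
        by_cases hcon : c = ' ' ∧ (i : Int) ≤ curr
        · rw [if_pos hcon] at h
          have ha : a = i := by injection h with h'; omega
          rcases k with _ | k
          · omega
          · have := (pvLastSp_none_iff curr rest (i+1)).mp hrec k (by simpa using hk)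
            push_cast at this hle; omega
        · rw [if_neg hcon] at h; exact absurd h (by simp)
      · rw [hrec] at h
        simp only [] at h
        have h' : j = a := by injection h
        rcases k with _ | k
        · have h1 := (pvLastSp_mem curr rest (i+1) j hrec).1
          omega
        · have := ih (i+1) j hrec k (by simpa using hk) (by push_cast at hle ⊢; omega)
          omega

lemma pvLoop_eq (curr : Int) : ∀ (cs : List Char) (i : Nat) (latest : Int),
    fcswiLoop curr cs i latest =
      if ∃ k < cs.length, cs[k]? = some ' ' ∧ curr < (i : Int) + k then
        some ((pvLastSp curr cs i).elim latest (fun j => (j : Int)))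
      else none := by
  intro cs
  induction cs with
  | nil => intro i latest; simp [fcswiLoop]
  | cons c rest ih =>
      intro i latest
      simp only [fcswiLoop]
      by_cases hc : c = ' '
      · by_cases hgt : (i : Int) > curr
        · rw [if_pos hc, if_pos hgt]
          have hex : ∃ k < (c :: rest).length, (c :: rest)[k]? = some ' ' ∧ curr < (i : Int) + k := by
            exact ⟨0, by simp, by simp [hc], by push_cast; omega⟩
          rw [if_pos hex]
          have h1 : pvLastSp curr rest (i+1) = none :=
            pvLastSp_none curr rest (i+1) (by push_cast; omega)
          have h2 : ¬ (c = ' ' ∧ (i : Int) ≤ curr) := by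
            intro hcon; omega
          simp [pvLastSp, h1, h2]
        · have hiff : (∃ k < rest.length, rest[k]? = some ' ' ∧ curr < (((i+1 : Nat)) : Int) + k)
              ↔ (∃ k < (c :: rest).length, (c :: rest)[k]? = some ' ' ∧ curr < (i : Int) + k) := by
            constructor
            · rintro ⟨k, hk, hsp, hlt⟩
              exact ⟨k+1, by simpa using hk, by simpa using hsp, by push_cast at hlt ⊢; omega⟩
            · rintro ⟨k, hk, hsp, hlt⟩
              rcases k with _ | k
              · exact absurd hlt (by push_cast; omega)
              · exact ⟨k, by simpa using hk, by simpa using hsp, by push_cast at hlt ⊢; omega⟩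
          rw [if_pos hc, if_neg hgt, ih (i+1) (i : Int), if_congr hiff rfl rfl]
          rcases hrec : pvLastSp curr rest (i+1) with _ | j
          · have h2 : c = ' ' ∧ (i : Int) ≤ curr := ⟨hc, by omega⟩
            simp [pvLastSp, hrec, h2]
          · simp [pvLastSp, hrec]
      · have hiff : (∃ k < rest.length, rest[k]? = some ' ' ∧ curr < (((i+1 : Nat)) : Int) + k)
            ↔ (∃ k < (c :: rest).length, (c :: rest)[k]? = some ' ' ∧ curr < (i : Int) + k) := by
          constructor
          · rintro ⟨k, hk, hsp, hlt⟩
            exact ⟨k+1, by simpa using hk, by simpa using hsp, by push_cast at hlt ⊢; omega⟩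
          · rintro ⟨k, hk, hsp, hlt⟩
            rcases k with _ | k
            · exact absurd hsp (by simp [hc])
            · exact ⟨k, by simpa using hk, by simpa using hsp, by push_cast at hlt ⊢; omega⟩
        rw [if_neg hc, ih (i+1) latest, if_congr hiff rfl rfl]
        rcases hrec : pvLastSp curr rest (i+1) with _ | j
        · simp [pvLastSp, hrec, hc]
        · simp [pvLastSp, hrec]

lemma pvFindFrom_iff (cs : List Char) (curr : Int) :
    (PySem.Chars.findFrom cs [' '] (max (curr + 1) 0) none = -1
      ↔ ¬ ∃ k < cs.length, cs[k]? = some ' ' ∧ curr < (k : Int)) := by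
  by_cases hbig : (cs.length : Int) < max (curr + 1) 0
  · have hl : PySem.Chars.findFrom cs [' '] (max (curr + 1) 0) none = -1 := by
      simp only [PySem.Chars.findFrom]
      have h1 : ¬ (max (curr + 1) 0 < 0) := by omega
      rw [if_neg h1, if_pos hbig]
    rw [hl]
    constructor
    · intro _
      rintro ⟨k, hk, _, hlt⟩
      have : (k : Int) < cs.length := by exact_mod_cast hk
      omega
    · intro _; rfl
  · have h0 : (0:Int) ≤ max (curr + 1) 0 := le_max_right _ _
    have hle : max (curr + 1) 0 ≤ (cs.length : Int) := by omega
    set k0 : Nat := (max (curr + 1) 0).toNat with hk0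
    have hcast : ((k0 : Nat) : Int) = max (curr + 1) 0 := Int.toNat_of_nonneg h0
    have hk0le : k0 ≤ cs.length := by omega
    rw [← hcast, PySem.Chars.findFrom_natCast_eq_neg_one_iff cs [' '] k0 hk0le]
    rw [pvSingleton_infix, List.mem_iff_getElem?]
    constructor
    · intro h hcon
      apply h
      obtain ⟨k, hk, hsp, hlt⟩ := hcon
      have hge : k0 ≤ k := by omega
      refine ⟨k - k0, ?_⟩
      rw [List.getElem?_drop]
      rw [show k0 + (k - k0) = k by omega]
      exact hsp
    · intro h hcon
      apply h
      obtain ⟨j, hj⟩ := hcon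
      rw [List.getElem?_drop] at hj
      have hlt : k0 + j < cs.length := (List.getElem?_eq_some_iff.mp hj).1
      refine ⟨k0 + j, hlt, hj, ?_⟩
      have : curr + 1 ≤ (k0 : Int) + j := by push_cast; omega
      push_cast; omega

lemma pvBefore_eq (cs : List Char) (curr : Int) :
    PySem.Chars.rfindFrom cs [' '] 0 (some (max (curr + 1) 0)) =
      (pvLastSp curr cs 0).elim (-1) (fun j => (j : Int)) := by
  have hE : (if ((cs.length:Int) ≤ curr ∨ (cs.length:Int) < 0) then (cs.length:Int) else max (curr+1) 0)
      = min (cs.length:Int) (max (curr+1) 0) := by split_ifs <;> omega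
  simp only [PySem.Chars.rfindFrom]
  norm_num
  rw [hE]
  have hnn : ¬ min (cs.length:Int) (max (curr+1) 0) < 0 := by omega
  rw [if_neg hnn]
  set t : Nat := (min (cs.length:Int) (max (curr+1) 0)).toNat with ht
  have htn : t ≤ cs.length := by omega
  have htc : (t : Int) = min (cs.length:Int) (max (curr+1) 0) := by omega
  have hlen : (List.take t cs).length = t := by simp [List.length_take]; omega
  simp only [PySem.Chars.rfind]
  rw [pvGo_spec (List.take t cs) ((List.take t cs).length), hlen]
  have hP : ∀ j : Nat, ((List.take t cs)[j]? = some ' ') ↔ (j < t ∧ cs[j]? = some ' ') := by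
    intro j
    rw [List.getElem?_take]
    split_ifs with hj
    · simp [hj]
    · simp [hj]
  have hjle : ∀ j : Nat, j < t → (j : Int) ≤ curr := by
    intro j hj
    have : (j : Int) < min (cs.length:Int) (max (curr+1) 0) := by omega
    omega
  rcases hrec : pvLastSp curr cs 0 with _ | a
  · have hnone := (pvLastSp_none_iff curr cs 0).mp hrec
    have hno : ¬ ∃ j ≤ t, (List.take t cs)[j]? = some ' ' := by
      rintro ⟨j, hj, hsp⟩
      rw [hP j] at hsp
      have h1 := hnone j hsp.2
      have h2 := hjle j hsp.1
      push_cast at h1; omega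
    rw [if_neg hno]
    simp
  · obtain ⟨-, hmem, hle2⟩ := pvLastSp_mem curr cs 0 a hrec
    rw [Nat.sub_zero] at hmem
    have haN : a < cs.length := (List.getElem?_eq_some_iff.mp hmem).1
    have hat : a < t := by
      have h1 : (a : Int) < max (curr + 1) 0 := by omega
      have h2 : (a : Int) < (cs.length : Int) := by exact_mod_cast haN
      omega
    have hPa : (List.take t cs)[a]? = some ' ' := (hP a).mpr ⟨hat, hmem⟩
    have hex : ∃ j ≤ t, (List.take t cs)[j]? = some ' ' := ⟨a, by omega, hPa⟩
    rw [if_pos hex]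
    set g : Nat := Nat.findGreatest (fun j => (List.take t cs)[j]? = some ' ') t with hg
    have hag : a ≤ g := Nat.le_findGreatest (P := fun j => (List.take t cs)[j]? = some ' ') (by omega) hPa
    have hPg : (List.take t cs)[g]? = some ' ' :=
      Nat.findGreatest_spec (P := fun j => (List.take t cs)[j]? = some ' ') (by omega : a ≤ t) hPa
    rw [hP g] at hPg
    have hgle : g ≤ a := by
      have := pvLastSp_max curr cs 0 a hrec g hPg.2 (by
        have h9 := hjle g hPg.1
        push_cast
        omega)
      omega
    have hga : g = a := le_antisymm hgle hag
    simp [hga]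

-- ===== VERDICT (by name: the statement is the Claim_ definition above) =====
theorem find_closest_start_word_index_spec : Claim_equal_find_closest_start_word_index := by
  intro text curr _
  unfold Spec_find_closest_start_word_index find_closest_start_word_index find_closest_start_word_index_alt
  simp only [PySem.Str.findFrom_eq, PySem.Str.rfindFrom_eq]
  rw [show (" " : String).toList = [' '] from rfl]
  set cs := text.toList with hcs
  rw [pvLoop_eq curr cs 0 0, pvBefore_eq cs curr]
  by_cases hE : ∃ k < cs.length, cs[k]? = some ' ' ∧ curr < (k : Int)
  · have hf : PySem.Chars.findFrom cs [' '] (max (curr + 1) 0) none ≠ -1 := by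
      intro hcon
      exact ((pvFindFrom_iff cs curr).mp hcon) hE
    have hE' : ∃ k < cs.length, cs[k]? = some ' ' ∧ curr < ((0:Nat) : Int) + (k:Int) := by
      obtain ⟨k, h1, h2, h3⟩ := hE; exact ⟨k, h1, h2, by push_cast; omega⟩
    rw [if_pos hE', if_neg hf]
    rcases hrec : pvLastSp curr cs 0 with _ | a
    · simp
    · have hne : ((a : Nat) : Int) ≠ -1 := by omega
      simp [hne]
  · have hf : PySem.Chars.findFrom cs [' '] (max (curr + 1) 0) none = -1 := by
      exact (pvFindFrom_iff cs curr).mpr hE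
    have hE' : ¬ ∃ k < cs.length, cs[k]? = some ' ' ∧ curr < ((0:Nat) : Int) + (k:Int) := by
      intro ⟨k, h1, h2, h3⟩; exact hE ⟨k, h1, h2, by push_cast at h3 ⊢; omega⟩
    rw [if_neg hE', if_pos hf]
    simp
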